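-- pv_equiv track=rewrite | github.com/ooeunz/programmers | Lv1/week02-test-1.py | solution
-- ===== SOURCE A (Python) =====
-- def solution(seats):
--     space = {}
--     ans = 0
--     for seat in seats:
--         x, y = seat
--         if (x, y) in space:
--             continue
--         else:
--             space[(x, y)] = True
--             ans += 1
--     return ans
-- ===== SOURCE B (Python) =====
-- def solution(seats):
--     coords = []
--     for seat in seats:
--         x, y = seat
--         coords.append((x, y))
--     coords.sort()
--     ans = 0
--     for i in range(len(coords)):
--         if i == 0 or coords[i] != coords[i - 1]:
--             ans += 1
--     return ans
-- ===== Notes on version B (the rewrite author's own statement) =====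
-- stated objective: alternative
-- what changed: Replaces A's hash-dict membership loop by building the list of coordinate pairs, sorting it, and counting distinct elements in one adjacent-comparison scan over the sorted list.
import Mathlib
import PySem

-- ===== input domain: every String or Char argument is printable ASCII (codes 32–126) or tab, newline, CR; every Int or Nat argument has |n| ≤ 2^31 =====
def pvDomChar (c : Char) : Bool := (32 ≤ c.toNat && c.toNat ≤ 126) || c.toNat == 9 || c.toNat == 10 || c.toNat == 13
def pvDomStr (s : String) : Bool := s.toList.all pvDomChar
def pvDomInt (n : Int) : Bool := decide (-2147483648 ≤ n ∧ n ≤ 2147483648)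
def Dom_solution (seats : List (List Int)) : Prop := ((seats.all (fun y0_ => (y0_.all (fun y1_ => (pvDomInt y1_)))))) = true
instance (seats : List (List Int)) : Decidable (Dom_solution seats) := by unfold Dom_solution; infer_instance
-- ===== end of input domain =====

-- B replaces A's hash-dict membership loop by sort-then-adjacent-comparison counting of distinct
-- coordinate pairs (objective: alternative algorithm, same return value).


-- ===== PORT A =====
-- 'x, y = seat' ported as seat[0], seat[1] (pyGetD with dummy default 0); exact under
-- Pre_solution, which requires every seat to have length 2 (elsewhere Python raises ValueError).
def solution (seats : List (List Int)) : Int :=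
  (seats.foldl
    (fun (st : PySem.Dict (Int × Int) Bool × Int) seat =>
      let x := PySem.List.pyGetD seat 0 0
      let y := PySem.List.pyGetD seat 1 0
      if st.1.contains (x, y) then st
      else (st.1.insert (x, y) true, st.2 + 1))
    (PySem.Dict.empty, 0)).2

-- ===== PORT B =====
-- the scan 'for i in range(len(coords)): if i == 0 or coords[i] != coords[i-1]: ans += 1'
def countFrom (prev : Int × Int) : List (Int × Int) → Int
  | [] => 0
  | y :: ys => (if y = prev then 0 else 1) + countFrom y ys

def solution_alt (seats : List (List Int)) : Int :=
  let coords := seats.map (fun seat => (PySem.List.pyGetD seat 0 0, PySem.List.pyGetD seat 1 0))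
  match PySem.List.sorted2 coords Prod.fst Prod.snd false with
  | [] => 0
  | c :: cs => 1 + countFrom c cs

-- ===== PRECONDITION & SPEC =====
-- Pre_: exactly the inputs on which Python's 'x, y = seat' succeeds (A raises ValueError otherwise).
def Pre_solution (seats : List (List Int)) : Prop := ∀ s ∈ seats, s.length = 2
instance (seats : List (List Int)) : Decidable (Pre_solution seats) := by unfold Pre_solution; infer_instance
def pvWitness_solution : List (List Int) := [[1, 2], [1, 2], [3, 4]]

def Spec_solution (seats : List (List Int)) (out : Int) : Prop := out = solution_alt seats
instance (seats : List (List Int)) (out : Int) : Decidable (Spec_solution seats out) := by unfold Spec_solution; infer_instance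

-- ===== CLAIM (what is proved, stated in full; the proofs are below) =====
def Claim_equal_solution : Prop := ∀ (seats : List (List Int)), Dom_solution seats → Pre_solution seats → Spec_solution seats (solution seats)

-- ===== LEMMAS AND PROOFS =====

-- lexicographic ≤ on pairs: Python's tuple comparison order
def pvLexLe (a b : Int × Int) : Prop := a.1 < b.1 ∨ (a.1 = b.1 ∧ a.2 ≤ b.2)

-- the comparator sorted2 uses for keys (fst, snd)
def pvBefore (a b : Int × Int) : Bool :=
  decide (a.1 < b.1) || (!decide (b.1 < a.1) && decide (a.2 < b.2))

lemma pvLexLe_of_before {a b : Int × Int} (h : pvBefore a b = true) : pvLexLe a b := by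
  unfold pvBefore at h; unfold pvLexLe
  simp only [Bool.or_eq_true, Bool.and_eq_true, Bool.not_eq_true', decide_eq_true_eq,
    decide_eq_false_iff_not] at h
  omega

lemma pvLexLe_of_not_before {a b : Int × Int} (h : pvBefore a b = false) : pvLexLe b a := by
  unfold pvBefore at h; unfold pvLexLe
  simp only [Bool.or_eq_false_iff, Bool.and_eq_false_iff, Bool.not_eq_false', decide_eq_true_eq,
    decide_eq_false_iff_not] at h
  omega

lemma pvLexLe_trans {a b c : Int × Int} (h1 : pvLexLe a b) (h2 : pvLexLe b c) : pvLexLe a c := by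
  unfold pvLexLe at *; omega

lemma pvLexLe_antisymm {a b : Int × Int} (h1 : pvLexLe a b) (h2 : pvLexLe b a) : a = b := by
  unfold pvLexLe at *
  have : a.1 = b.1 ∧ a.2 = b.2 := by omega
  exact Prod.ext this.1 this.2

lemma pairwise_insertBy (x : Int × Int) (ys : List (Int × Int))
    (h : ys.Pairwise pvLexLe) :
    (PySem.List.insertBy pvBefore x ys).Pairwise pvLexLe := by
  induction ys with
  | nil => simp [PySem.List.insertBy]
  | cons y ys ih =>
    rw [PySem.List.insertBy.eq_2]
    obtain ⟨hy, hys⟩ := List.pairwise_cons.mp h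
    by_cases hb : pvBefore x y = true
    · simp only [hb, if_true]
      refine List.Pairwise.cons ?_ (List.Pairwise.cons hy hys)
      intro z hz
      rcases List.mem_cons.mp hz with rfl | hz
      · exact pvLexLe_of_before hb
      · exact pvLexLe_trans (pvLexLe_of_before hb) (hy z hz)
    · simp only [hb]
      refine List.Pairwise.cons ?_ (ih hys)
      intro z hz
      rcases (PySem.List.insertBy_mem_iff _ _ _ _).mp hz with rfl | hz
      · exact pvLexLe_of_not_before (Bool.eq_false_iff.mpr hb)
      · exact hy z hz

lemma pairwise_foldl_insertBy (xs acc : List (Int × Int)) (h : acc.Pairwise pvLexLe) :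
    (xs.foldl (fun acc x => PySem.List.insertBy pvBefore x acc) acc).Pairwise pvLexLe := by
  induction xs generalizing acc with
  | nil => exact h
  | cons x xs ih => exact ih _ (pairwise_insertBy x acc h)

lemma sorted2_eq_foldl (xs : List (Int × Int)) :
    PySem.List.sorted2 xs Prod.fst Prod.snd false =
      xs.foldl (fun acc x => PySem.List.insertBy pvBefore x acc) [] := rfl

lemma pairwise_sorted2 (xs : List (Int × Int)) :
    (PySem.List.sorted2 xs Prod.fst Prod.snd false).Pairwise pvLexLe := by
  rw [sorted2_eq_foldl]
  exact pairwise_foldl_insertBy xs [] (List.Pairwise.nil)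

lemma card_insert_erase (s : Finset (Int × Int)) (a : Int × Int) :
    (insert a s).card = (s.erase a).card + 1 := by
  by_cases h : a ∈ s
  · rw [Finset.insert_eq_self.mpr h, Finset.card_erase_of_mem h]
    have := Finset.card_pos.mpr ⟨a, h⟩
    omega
  · rw [Finset.card_insert_of_notMem h, Finset.erase_eq_of_notMem h]

-- B's scan from a previous element counts the distinct elements of the tail other than prev
lemma countFrom_eq (l : List (Int × Int)) (prev : Int × Int)
    (h : (prev :: l).Pairwise pvLexLe) :
    countFrom prev l = ((l.toFinset.erase prev).card : Int) := by
  induction l generalizing prev with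
  | nil => simp [countFrom]
  | cons y ys ih =>
    obtain ⟨hprev, hy⟩ := List.pairwise_cons.mp h
    have hyys : ∀ z ∈ ys, pvLexLe y z := fun z hz => (List.pairwise_cons.mp hy).1 z hz
    by_cases heq : y = prev
    · subst heq
      rw [List.toFinset_cons, Finset.erase_insert_eq_erase,
        show countFrom y (y :: ys) = countFrom y ys from by simp [countFrom]]
      exact ih y hy
    · have hnm : prev ∉ (y :: ys).toFinset := by
        simp only [List.mem_toFinset, List.mem_cons]
        rintro (rfl | hmem)
        · exact heq rfl
        · exact heq (pvLexLe_antisymm (hyys prev hmem)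
            (hprev y (List.mem_cons_self)))
      rw [Finset.erase_eq_of_notMem hnm]
      simp only [countFrom, if_neg heq, List.toFinset_cons]
      rw [ih y hy, card_insert_erase]
      push_cast; ring

-- B computes the number of distinct pairs
lemma alt_eq_card (xs : List (Int × Int)) :
    (match PySem.List.sorted2 xs Prod.fst Prod.snd false with
      | [] => (0 : Int)
      | c :: cs => 1 + countFrom c cs) = (xs.toFinset.card : Int) := by
  have hperm := PySem.List.sorted2_perm xs Prod.fst Prod.snd false
  have hfin : (PySem.List.sorted2 xs Prod.fst Prod.snd false).toFinset = xs.toFinset :=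
    List.toFinset_eq_of_perm _ _ hperm
  have hpw := pairwise_sorted2 xs
  rcases hs : PySem.List.sorted2 xs Prod.fst Prod.snd false with _ | ⟨c, cs⟩
  · rw [hs] at hfin; simp [← hfin]
  · rw [hs] at hfin hpw
    simp only []
    rw [countFrom_eq cs c hpw, ← hfin, List.toFinset_cons, card_insert_erase]
    push_cast; ring

-- A's dict loop, at the pair level
def stepA (st : PySem.Dict (Int × Int) Bool × Int) (p : Int × Int) :
    PySem.Dict (Int × Int) Bool × Int :=
  if st.1.contains p then st else (st.1.insert p true, st.2 + 1)

lemma foldA_eq (ps : List (Int × Int)) (d : PySem.Dict (Int × Int) Bool) (n : Int) :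
    (ps.foldl stepA (d, n)).2 =
      n + ((ps.toFinset.filter (fun p => d.contains p = false)).card : Int) := by
  induction ps generalizing d n with
  | nil => simp
  | cons p ps ih =>
    simp only [List.foldl_cons, List.toFinset_cons, Finset.filter_insert]
    by_cases hc : d.contains p = true
    · rw [stepA, if_pos hc]
      rw [ih d n]
      simp [hc]
    · have hc' : d.contains p = false := Bool.eq_false_iff.mpr hc
      rw [stepA, if_neg hc]
      rw [ih (d.insert p true) (n + 1)]
      have hfilter : ps.toFinset.filter (fun q => (d.insert p true).contains q = false)
          = (ps.toFinset.filter (fun q => d.contains q = false)).erase p := by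
        rw [← Finset.filter_ne']
        rw [Finset.filter_filter]
        apply Finset.filter_congr
        intro q _
        simp only [PySem.Dict.contains_insert, Bool.or_eq_false_iff, beq_eq_false_iff_ne]
        tauto
      rw [hfilter, if_pos hc', card_insert_erase]
      push_cast; ring

-- ===== VERDICT (by name: the statement is the Claim_ definition above) =====
theorem solution_spec : Claim_equal_solution := by
  intro seats _ _
  unfold Spec_solution solution solution_alt
  simp only []
  have h : (List.map (fun seat => (PySem.List.pyGetD seat 0 0, PySem.List.pyGetD seat 1 0))
        seats).foldl stepA ((PySem.Dict.empty : PySem.Dict (Int × Int) Bool), (0 : Int))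
      = seats.foldl
          (fun (st : PySem.Dict (Int × Int) Bool × Int) seat =>
            let x := PySem.List.pyGetD seat 0 0
            let y := PySem.List.pyGetD seat 1 0
            if st.1.contains (x, y) then st
            else (st.1.insert (x, y) true, st.2 + 1))
          (PySem.Dict.empty, 0) := by
    rw [List.foldl_map]
    rfl
  rw [← h, foldA_eq, alt_eq_card]
  simp [PySem.Dict.contains_empty]
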